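-- pv_equiv track=rewrite | github.com/myszpolna/genus | genus/RNA.py | compute_length
-- ===== SOURCE A (Python) =====
-- def compute_length(tab):
--     u'''length compute static method'''
--     jeden = []
--     for row in tab:
--         jeden.append(row[0])
--         jeden.append(row[1])
--     minimal = min(jeden)
--     maximal = max(jeden)
--     del jeden
--     return maximal - minimal + 1
-- ===== SOURCE B (Python) =====
-- def compute_length(tab):
--     u'''length compute static method'''
--     it = iter(tab)
--     try:
--         first = next(it)
--     except StopIteration:
--         raise ValueError("compute_length of empty table")
--     minimal = min(first[0], first[1])
--     maximal = max(first[0], first[1])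
--     for row in it:
--         if row[0] < minimal: minimal = row[0]
--         if row[1] < minimal: minimal = row[1]
--         if row[0] > maximal: maximal = row[0]
--         if row[1] > maximal: maximal = row[1]
--     return maximal - minimal + 1
-- ===== Notes on version B (the rewrite author's own statement) =====
-- stated objective: alternative
-- what changed: B folds once over the rows keeping running minimal/maximal instead of materialising a flat list and scanning it twice with min() and max().
import Mathlib
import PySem

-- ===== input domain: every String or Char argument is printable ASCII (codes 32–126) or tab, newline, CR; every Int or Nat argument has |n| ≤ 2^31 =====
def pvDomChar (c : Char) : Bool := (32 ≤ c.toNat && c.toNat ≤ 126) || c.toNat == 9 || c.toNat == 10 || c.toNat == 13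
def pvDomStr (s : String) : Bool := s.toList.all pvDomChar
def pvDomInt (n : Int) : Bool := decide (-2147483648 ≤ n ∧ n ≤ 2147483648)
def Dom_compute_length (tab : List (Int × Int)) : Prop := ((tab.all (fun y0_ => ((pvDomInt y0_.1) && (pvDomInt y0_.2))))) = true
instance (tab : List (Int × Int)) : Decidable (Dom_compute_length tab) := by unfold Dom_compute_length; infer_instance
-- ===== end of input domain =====

-- B: one fold keeping running min/max instead of building a flat list and scanning it twice (alternative decomposition).
-- ===== PORT A =====
def compute_length (tab : List (Int × Int)) : Int :=
  let jeden := tab.foldl (fun acc row => (acc ++ [row.1]) ++ [row.2]) []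
  let minimal := (PySem.List.min? jeden (fun x => x)).getD 0
  let maximal := (PySem.List.max? jeden (fun x => x)).getD 0
  maximal - minimal + 1

-- ===== PORT B =====
def compute_length_alt (tab : List (Int × Int)) : Int :=
  match tab with
  | [] => 0  -- unreachable under Pre_: Python B raises ValueError here, like A
  | first :: rest =>
    let p := rest.foldl
      (fun (p : Int × Int) row =>
        let mn := if row.1 < p.1 then row.1 else p.1
        let mn := if row.2 < mn then row.2 else mn
        let mx := if row.1 > p.2 then row.1 else p.2
        let mx := if row.2 > mx then row.2 else mx
        (mn, mx))
      (min first.1 first.2, max first.1 first.2)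
    p.2 - p.1 + 1

-- ===== PRECONDITION & SPEC =====
-- Pre_ excludes the empty list, on which A's min([]) raises ValueError.
def Pre_compute_length (tab : List (Int × Int)) : Prop := tab ≠ []
instance (tab : List (Int × Int)) : Decidable (Pre_compute_length tab) := by unfold Pre_compute_length; infer_instance
def pvWitness_compute_length : (List (Int × Int)) := [(1, 3), (2, 7)]
def Spec_compute_length (tab : List (Int × Int)) (out : Int) : Prop := out = compute_length_alt tab
instance (tab : List (Int × Int)) (out : Int) : Decidable (Spec_compute_length tab out) := by unfold Spec_compute_length; infer_instance

-- ===== CLAIM (what is proved, stated in full; the proofs are below) =====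
def Claim_equal_compute_length : Prop := ∀ (tab : List (Int × Int)), Dom_compute_length tab → Pre_compute_length tab → Spec_compute_length tab (compute_length tab)

-- ===== LEMMAS AND PROOFS =====

theorem jeden_flat (tab : List (Int × Int)) (acc : List Int) :
    tab.foldl (fun acc row => (acc ++ [row.1]) ++ [row.2]) acc
      = acc ++ tab.flatMap (fun r => [r.1, r.2]) := by
  induction tab generalizing acc with
  | nil => simp
  | cons r t ih => simp [List.foldl, ih, List.flatMap]

theorem alt_fold_flat (rest : List (Int × Int)) (a b : Int) :
    rest.foldl
      (fun (p : Int × Int) row =>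
        let mn := if row.1 < p.1 then row.1 else p.1
        let mn := if row.2 < mn then row.2 else mn
        let mx := if row.1 > p.2 then row.1 else p.2
        let mx := if row.2 > mx then row.2 else mx
        (mn, mx)) (a, b)
      = ((rest.flatMap (fun r => [r.1, r.2])).foldl min a,
         (rest.flatMap (fun r => [r.1, r.2])).foldl max b) := by
  induction rest generalizing a b with
  | nil => simp
  | cons r t ih =>
    simp only [List.foldl, List.flatMap_cons, List.cons_append, List.nil_append]
    rw [ih]
    congr 1
    · congr 1
      simp only [min_def]
      split_ifs <;> omega
    · congr 1
      simp only [max_def]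
      split_ifs <;> omega

-- ===== VERDICT (by name: the statement is the Claim_ definition above) =====
theorem compute_length_spec : Claim_equal_compute_length := by
  intro tab _ hpre
  unfold Spec_compute_length compute_length compute_length_alt
  match tab with
  | [] => exact absurd rfl hpre
  | first :: rest =>
    simp only [jeden_flat, List.nil_append, List.flatMap_cons, List.cons_append,
      List.nil_append, alt_fold_flat,
      PySem.List.min?_id_cons, PySem.List.max?_id_cons, Option.getD_some, List.foldl]
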